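-- pv_equiv track=rewrite | github.com/chrisryda/security-IDATT2503 | ex10/task2.py | get_z_star
-- ===== SOURCE A (Python) =====
-- def get_z_star(n):
--     z_star = []
--     for r_n in range(1, n):
--         for i in range(1, n):
--             value = (i*r_n)%n
--             if (value == 1 and (i*r_n) not in z_star):
--                 z_star.append(r_n)
--     return z_star
-- ===== SOURCE B (Python) =====
-- def get_z_star(n):
--     z_star = []
--     for r in range(1, n):
--         a, b = n, r
--         while b:
--             a, b = b, a % b
--         if a == 1:
--             z_star.append(r)
--     return z_star
-- ===== Notes on version B (the rewrite author's own statement) =====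
-- stated objective: faster
-- what changed: Replaces the per-element inner scan for a modular inverse (plus a list membership test) with a single pass that tests coprimality via Euclid's gcd.
import Mathlib
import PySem

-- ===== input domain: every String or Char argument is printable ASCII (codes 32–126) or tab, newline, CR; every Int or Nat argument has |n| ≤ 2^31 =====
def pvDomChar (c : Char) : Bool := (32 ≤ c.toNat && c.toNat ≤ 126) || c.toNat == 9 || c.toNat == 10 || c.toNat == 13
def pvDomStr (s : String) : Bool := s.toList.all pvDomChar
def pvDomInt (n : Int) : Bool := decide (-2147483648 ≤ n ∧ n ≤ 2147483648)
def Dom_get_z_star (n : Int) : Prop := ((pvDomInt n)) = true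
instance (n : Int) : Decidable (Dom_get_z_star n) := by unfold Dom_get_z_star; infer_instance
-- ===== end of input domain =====

-- B replaces A's per-element inner-scan inverse search (plus list membership test) with a
-- single pass testing coprimality by Euclid's gcd; same list of units of Z/nZ in order.

-- ===== PORT A =====
def get_z_star (n : Int) : List Int :=
  (PySem.List.pyRange 1 n 1).foldl (fun z_star r_n =>
    (PySem.List.pyRange 1 n 1).foldl (fun z_star i =>
      let value := PySem.Int.mod (i * r_n) n
      if value = 1 ∧ (i * r_n) ∉ z_star then z_star ++ [r_n] else z_star) z_star) []

-- ===== PORT B =====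
-- termination fact for the while-loop helper (cited by its decreasing_by)
theorem pv_mod_natAbs_lt (a b : Int) (h : ¬ b = 0) : (PySem.Int.mod a b).natAbs < b.natAbs := by
  rcases lt_or_gt_of_ne h with hb | hb
  · have := PySem.Int.mod_neg_bounds a hb
    omega
  · have h1 := PySem.Int.mod_nonneg a hb
    have h2 := PySem.Int.mod_lt a hb
    omega

-- the 'while b: a, b = b, a % b' loop of B
def pyEuclid (a b : Int) : Int :=
  if h : b = 0 then a else pyEuclid b (PySem.Int.mod a b)
termination_by b.natAbs
decreasing_by exact pv_mod_natAbs_lt a b h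

def get_z_star_alt (n : Int) : List Int :=
  (PySem.List.pyRange 1 n 1).foldl (fun z_star r =>
    if pyEuclid n r = 1 then z_star ++ [r] else z_star) []

-- ===== PRECONDITION & SPEC =====
def Spec_get_z_star (n : Int) (out : List Int) : Prop := out = get_z_star_alt n
instance (n : Int) (out : List Int) : Decidable (Spec_get_z_star n out) := by unfold Spec_get_z_star; infer_instance

-- ===== CLAIM (what is proved, stated in full; the proofs are below) =====
def Claim_equal_get_z_star : Prop := ∀ (n : Int), Dom_get_z_star n → Spec_get_z_star n (get_z_star n)

-- ===== LEMMAS AND PROOFS =====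

-- B's loop is a filter
theorem pv_alt_eq_filter (n : Int) :
    get_z_star_alt n = (PySem.List.pyRange 1 n 1).filter (fun r => decide (pyEuclid n r = 1)) := by
  unfold get_z_star_alt
  rw [PySem.List.foldl_append_ite_eq_filter]
  simp

-- pyEuclid on nonnegative arguments is the gcd
theorem pv_euclid_gcd : ∀ (k : Nat) (a b : Int), b.natAbs ≤ k → 0 ≤ a → 0 ≤ b →
    pyEuclid a b = (Nat.gcd b.toNat a.toNat : Int) := by
  intro k
  induction k with
  | zero =>
    intro a b hk ha hb
    have hb0 : b = 0 := by omega
    subst hb0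
    rw [pyEuclid]
    simp [Int.toNat_of_nonneg ha]
  | succ k ih =>
    intro a b hk ha hb
    rw [pyEuclid]
    split
    · rename_i hb0
      subst hb0
      simp [Int.toNat_of_nonneg ha]
    · rename_i hb0
      have hbpos : 0 < b := lt_of_le_of_ne hb (Ne.symm hb0)
      have hm1 := PySem.Int.mod_nonneg a hbpos
      have hlt := pv_mod_natAbs_lt a b hb0
      rw [ih b (PySem.Int.mod a b) (by omega) hb hm1]
      have hmt : (PySem.Int.mod a b).toNat = a.toNat % b.toNat := by
        rw [show PySem.Int.mod a b = a % b from PySem.Int.mod_eq_emod_of_pos hbpos]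
        rcases Int.eq_ofNat_of_zero_le ha with ⟨A, rfl⟩
        rcases Int.eq_ofNat_of_zero_le hb with ⟨B, rfl⟩
        norm_cast
      rw [hmt, Nat.gcd_rec b.toNat a.toNat]

-- uniqueness of the modular inverse in [0, n)
theorem pv_inv_unique (n r i j : Int) (hn : 1 < n)
    (hi1 : 0 ≤ i) (hi2 : i < n) (hj1 : 0 ≤ j) (hj2 : j < n)
    (hhi : PySem.Int.mod (i * r) n = 1) (hhj : PySem.Int.mod (j * r) n = 1) : i = j := by
  have hn0 : (0:Int) < n := by omega
  rw [PySem.Int.mod_eq_emod_of_pos hn0] at hhi hhj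
  have h1 : (1:Int) % n = 1 := Int.emod_eq_of_lt (by omega) (by omega)
  have ei : Int.ModEq n (i * r) 1 := by unfold Int.ModEq; rw [hhi, h1]
  have ej : Int.ModEq n (j * r) 1 := by unfold Int.ModEq; rw [hhj, h1]
  have c1 : Int.ModEq n (i * (j * r)) (i * 1) := ej.mul_left i
  have c2 : Int.ModEq n (j * (i * r)) (j * 1) := ei.mul_left j
  have hij : Int.ModEq n i j := by
    calc i ≡ i * (j * r) [ZMOD n] := by simpa using c1.symm
    _ = j * (i * r) := by ring
    _ ≡ j [ZMOD n] := by simpa using c2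
  unfold Int.ModEq at hij
  rw [Int.emod_eq_of_lt hi1 hi2, Int.emod_eq_of_lt hj1 hj2] at hij
  exact hij

-- existence of an inverse in range(1, n) ↔ coprimality
theorem pv_exists_inv_iff (n r : Int) (hr1 : 1 ≤ r) (hr2 : r < n) :
    (∃ i ∈ PySem.List.pyRange 1 n 1, PySem.Int.mod (i * r) n = 1) ↔
      Nat.gcd n.toNat r.toNat = 1 := by
  have hn0 : (0:Int) < n := by omega
  constructor
  · rintro ⟨i, hiL, hi⟩
    rw [PySem.Int.mod_eq_emod_of_pos hn0] at hi
    set g := Nat.gcd n.toNat r.toNat with hg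
    have hdn : (g : Int) ∣ n := by
      have := Nat.gcd_dvd_left n.toNat r.toNat
      have h2 : (g : Int) ∣ (n.toNat : Int) := Int.natCast_dvd_natCast.mpr this
      rwa [Int.toNat_of_nonneg (by omega)] at h2
    have hdr : (g : Int) ∣ r := by
      have := Nat.gcd_dvd_right n.toNat r.toNat
      have h2 : (g : Int) ∣ (r.toNat : Int) := Int.natCast_dvd_natCast.mpr this
      rwa [Int.toNat_of_nonneg (by omega)] at h2
    have hd1 : (g : Int) ∣ 1 := by
      rw [← hi, Int.emod_def]
      exact dvd_sub (hdr.mul_left i) (hdn.mul_right _)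
    have : g ∣ 1 := by exact_mod_cast hd1
    exact Nat.dvd_one.mp this
  · intro hg
    have hN : 1 < n.toNat := by omega
    have hco : Nat.Coprime r.toNat n.toNat := by
      unfold Nat.Coprime
      rw [Nat.gcd_comm]
      exact hg
    obtain ⟨m, hmlt, hm⟩ := Nat.exists_mul_mod_eq_one_of_coprime hco hN
    have hm0 : m ≠ 0 := by
      intro h0
      subst h0
      simp at hm
    refine ⟨(m : Int), ?_, ?_⟩
    · rw [PySem.List.mem_pyRange_one]
      constructor <;> omega
    · have hrc : r = ((r.toNat : Nat) : Int) := by omega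
      have hnc : n = ((n.toNat : Nat) : Int) := by omega
      rw [hrc, hnc, ← Nat.cast_mul, PySem.Int.mod_natCast]
      rw [Nat.mul_comm] at hm
      rw [hm]
      rfl

-- inner loop: if no element of L hits, the accumulator is unchanged
theorem pv_inner_no_hit (n r : Int) (L : List Int) (z : List Int)
    (h : ∀ i ∈ L, ¬ PySem.Int.mod (i * r) n = 1) :
    L.foldl (fun z_star i =>
      let value := PySem.Int.mod (i * r) n
      if value = 1 ∧ (i * r) ∉ z_star then z_star ++ [r] else z_star) z = z := by
  induction L generalizing z with
  | nil => rfl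
  | cons i L' ih =>
    simp only [List.foldl_cons]
    rw [if_neg]
    · exact ih z (fun j hj => h j (List.mem_cons_of_mem i hj))
    · rintro ⟨h1, -⟩
      exact h i List.mem_cons_self h1

-- inner loop characterisation: appends r exactly when some i in L is an inverse of r
theorem pv_inner_eq (n r : Int) (hr1 : 1 ≤ r) (hr2 : r < n)
    (L : List Int) (hnd : L.Nodup) (hL : ∀ i ∈ L, 1 ≤ i ∧ i < n)
    (z : List Int) (hz : ∀ x ∈ z, 1 ≤ x ∧ x < r) :
    L.foldl (fun z_star i =>
      let value := PySem.Int.mod (i * r) n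
      if value = 1 ∧ (i * r) ∉ z_star then z_star ++ [r] else z_star) z =
      if ∃ i ∈ L, PySem.Int.mod (i * r) n = 1 then z ++ [r] else z := by
  induction L generalizing z with
  | nil => simp
  | cons i L' ih =>
    have hiB := hL i List.mem_cons_self
    have hnd' : L'.Nodup := (List.nodup_cons.mp hnd).2
    have hinot : i ∉ L' := (List.nodup_cons.mp hnd).1
    by_cases hi : PySem.Int.mod (i * r) n = 1
    · have hmem : (i * r) ∉ z := by
        intro hx
        have hb := hz _ hx
        have : r ≤ i * r := le_mul_of_one_le_left (by omega) hiB.1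
        omega
      simp only [List.foldl_cons]
      rw [if_pos ⟨hi, hmem⟩]
      rw [pv_inner_no_hit]
      · rw [if_pos ⟨i, List.mem_cons_self, hi⟩]
      · intro j hj hhit
        have hjB := hL j (List.mem_cons_of_mem i hj)
        have : i = j := pv_inv_unique n r i j (by omega) (by omega) hiB.2 (by omega) hjB.2 hi hhit
        exact hinot (this ▸ hj)
    · simp only [List.foldl_cons]
      rw [if_neg (by rintro ⟨h1, -⟩; exact hi h1)]
      rw [ih hnd' (fun j hj => hL j (List.mem_cons_of_mem i hj)) z hz]
      by_cases hex : ∃ j ∈ L', PySem.Int.mod (j * r) n = 1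
      · rw [if_pos hex, if_pos]
        obtain ⟨j, hj, hh⟩ := hex
        exact ⟨j, List.mem_cons_of_mem i hj, hh⟩
      · rw [if_neg hex, if_neg]
        rintro ⟨j, hj, hh⟩
        rcases List.mem_cons.mp hj with rfl | hj'
        · exact hi hh
        · exact hex ⟨j, hj', hh⟩

-- A's outer loop builds the filter of range(1, m) by the inverse-existence test
theorem pv_outer (n : Int) : ∀ (k : Nat), 1 + (k : Int) ≤ n →
    (PySem.List.pyRange 1 (1 + (k : Int)) 1).foldl (fun z_star r_n =>
      (PySem.List.pyRange 1 n 1).foldl (fun z_star i =>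
        let value := PySem.Int.mod (i * r_n) n
        if value = 1 ∧ (i * r_n) ∉ z_star then z_star ++ [r_n] else z_star) z_star) [] =
    (PySem.List.pyRange 1 (1 + (k : Int)) 1).filter
      (fun r => decide (∃ i ∈ PySem.List.pyRange 1 n 1, PySem.Int.mod (i * r) n = 1)) := by
  intro k
  induction k with
  | zero =>
    intro _
    norm_num [PySem.List.pyRange_one_eq_nil]
  | succ k ih =>
    intro hk
    have hm : (1:Int) ≤ 1 + (k:Int) := by omega
    have hcast : 1 + ((k+1 : Nat) : Int) = (1 + (k:Int)) + 1 := by push_cast; ring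
    rw [hcast, PySem.List.pyRange_one_succ_right hm]
    rw [List.foldl_append, List.filter_append]
    rw [ih (by omega)]
    simp only [List.foldl_cons, List.foldl_nil]
    rw [pv_inner_eq n (1 + (k:Int)) (by omega) (by omega)
      (PySem.List.pyRange 1 n 1) (PySem.List.nodup_pyRange_one 1 n)
      (fun i hi => by rw [PySem.List.mem_pyRange_one] at hi; exact hi)
      _ (fun x hx => by
        have hx1 := List.mem_of_mem_filter hx
        rw [PySem.List.mem_pyRange_one] at hx1
        exact hx1)]
    by_cases hex : ∃ i ∈ PySem.List.pyRange 1 n 1, PySem.Int.mod (i * (1 + (k:Int))) n = 1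
    · rw [if_pos hex]
      simp only [List.filter_cons, List.filter_nil, decide_eq_true hex, if_true]
    · rw [if_neg hex]
      simp only [List.filter_cons, List.filter_nil, decide_eq_false hex, Bool.false_eq_true,
        if_false, List.append_nil]

-- ===== VERDICT (by name: the statement is the Claim_ definition above) =====
theorem get_z_star_spec : Claim_equal_get_z_star := by
  unfold Claim_equal_get_z_star Spec_get_z_star
  intro n _
  by_cases hn : n ≤ 1
  · show get_z_star n = get_z_star_alt n
    unfold get_z_star get_z_star_alt
    rw [PySem.List.pyRange_one_eq_nil hn]
    rfl
  · show get_z_star n = get_z_star_alt n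
    have hkey : get_z_star n = (PySem.List.pyRange 1 n 1).filter
        (fun r => decide (∃ i ∈ PySem.List.pyRange 1 n 1, PySem.Int.mod (i * r) n = 1)) := by
      have hcast : 1 + ((n-1).toNat : Int) = n := by omega
      have := pv_outer n (n-1).toNat (by omega)
      rw [hcast] at this
      exact this
    rw [hkey, pv_alt_eq_filter]
    apply List.filter_congr
    intro r hr
    rw [PySem.List.mem_pyRange_one] at hr
    simp only [decide_eq_decide]
    rw [pv_exists_inv_iff n r hr.1 hr.2]
    rw [pv_euclid_gcd n.natAbs n r (by omega) (by omega) (by omega)]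
    rw [Nat.gcd_comm]
    constructor
    · intro h; rw [h]; rfl
    · intro h; exact_mod_cast h
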